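-- pv_equiv track=rewrite | github.com/le314u/Academico | IFMG/VisaoComputacional/pratica8/pratica.py | getMaiorIntensidade
-- ===== SOURCE A (Python) =====
-- def getMaiorIntensidade(l, c, imgX):
--     li = l - 1
--     ci = c - 1
--     maiorIntensidade = 0
--     while (li < l + 1):
--         while (ci < c + 1):
--             if (maiorIntensidade < imgX[li][ci]):
--                 maiorIntensidade = imgX[li][ci]
--             ci += 1
--         li += 1
--     return maiorIntensidade
-- ===== SOURCE B (Python) =====
-- def getMaiorIntensidade(l, c, imgX):
--     # A's `ci` is never reset, so only imgX[l-1][c-1] and imgX[l-1][c] are ever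
--     # read; 0 is the initial floor.  Closed form, same reads in the same order.
--     return max(0, imgX[l - 1][c - 1], imgX[l - 1][c])
-- ===== Notes on version B (the rewrite author's own statement) =====
-- stated objective: simpler
-- what changed: Replaces the nested while loops (whose inner counter is never reset, so they only ever read imgX[l-1][c-1] and imgX[l-1][c]) with the closed-form max(0, imgX[l-1][c-1], imgX[l-1][c]).
import Mathlib
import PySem

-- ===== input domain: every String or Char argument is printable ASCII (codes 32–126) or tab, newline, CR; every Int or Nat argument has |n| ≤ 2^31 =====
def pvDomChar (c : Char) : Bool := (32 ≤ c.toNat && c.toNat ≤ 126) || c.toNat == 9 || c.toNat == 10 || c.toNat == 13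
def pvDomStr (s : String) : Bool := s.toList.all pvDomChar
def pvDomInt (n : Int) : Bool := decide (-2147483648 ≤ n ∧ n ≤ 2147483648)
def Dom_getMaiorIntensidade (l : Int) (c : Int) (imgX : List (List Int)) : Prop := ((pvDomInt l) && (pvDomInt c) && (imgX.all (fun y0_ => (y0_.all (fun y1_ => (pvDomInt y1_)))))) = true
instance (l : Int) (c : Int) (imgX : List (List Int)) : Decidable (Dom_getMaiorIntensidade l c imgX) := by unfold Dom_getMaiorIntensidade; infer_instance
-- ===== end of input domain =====

-- B replaces A's nested while loops (whose inner counter `ci` is never reset, so only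
-- imgX[l-1][c-1] and imgX[l-1][c] are ever read) by the closed form
-- max(0, imgX[l-1][c-1], imgX[l-1][c]); return values proved equal on Pre_ (no IndexError).

-- ===== PORT A =====
-- imgX[li][ci]; total form with default 0 — under Pre_ both indexings are in range (= no IndexError)
def pvCell (imgX : List (List Int)) (li ci : Int) : Int :=
  PySem.List.pyGetD (PySem.List.pyGetD imgX li []) ci 0

-- inner `while ci < c + 1` loop; returns the final (ci, maiorIntensidade)
def pvInnerA (imgX : List (List Int)) (li c : Int) (ci maior : Int) : Int × Int :=
  if ci < c + 1 then
    pvInnerA imgX li c (ci + 1)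
      (if maior < pvCell imgX li ci then pvCell imgX li ci else maior)
  else (ci, maior)
termination_by (c + 1 - ci).toNat
decreasing_by omega

-- outer `while li < l + 1` loop
def pvOuterA (imgX : List (List Int)) (l c : Int) (li ci maior : Int) : Int :=
  if li < l + 1 then
    let p := pvInnerA imgX li c ci maior
    pvOuterA imgX l c (li + 1) p.1 p.2
  else maior
termination_by (l + 1 - li).toNat
decreasing_by omega

def getMaiorIntensidade (l : Int) (c : Int) (imgX : List (List Int)) : Int :=
  pvOuterA imgX l c (l - 1) (c - 1) 0

-- ===== PORT B =====
-- max(0, imgX[l-1][c-1], imgX[l-1][c])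
def getMaiorIntensidade_alt (l : Int) (c : Int) (imgX : List (List Int)) : Int :=
  max (max 0 (pvCell imgX (l - 1) (c - 1))) (pvCell imgX (l - 1) c)

-- ===== PRECONDITION & SPEC =====
-- Pre_ = exactly the inputs where A's two subscript chains raise no IndexError
def Pre_getMaiorIntensidade (l : Int) (c : Int) (imgX : List (List Int)) : Prop :=
  PySem.Raise.InRange imgX.length (l - 1) ∧
  PySem.Raise.InRange (PySem.List.pyGetD imgX (l - 1) []).length (c - 1) ∧
  PySem.Raise.InRange (PySem.List.pyGetD imgX (l - 1) []).length c
instance (l : Int) (c : Int) (imgX : List (List Int)) : Decidable (Pre_getMaiorIntensidade l c imgX) := by unfold Pre_getMaiorIntensidade; infer_instance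

def pvWitness_getMaiorIntensidade : Int × Int × List (List Int) := (1, 1, [[5, 3], [2, 8]])

def Spec_getMaiorIntensidade (l : Int) (c : Int) (imgX : List (List Int)) (out : Int) : Prop := out = getMaiorIntensidade_alt l c imgX
instance (l : Int) (c : Int) (imgX : List (List Int)) (out : Int) : Decidable (Spec_getMaiorIntensidade l c imgX out) := by unfold Spec_getMaiorIntensidade; infer_instance

-- ===== CLAIM (what is proved, stated in full; the proofs are below) =====
def Claim_equal_getMaiorIntensidade : Prop := ∀ (l : Int) (c : Int) (imgX : List (List Int)), Dom_getMaiorIntensidade l c imgX → Pre_getMaiorIntensidade l c imgX → Spec_getMaiorIntensidade l c imgX (getMaiorIntensidade l c imgX)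

-- ===== LEMMAS AND PROOFS =====
lemma pvInnerA_stop (imgX : List (List Int)) (li c ci maior : Int) (h : ¬ ci < c + 1) :
    pvInnerA imgX li c ci maior = (ci, maior) := by
  rw [pvInnerA]; simp [h]

lemma pvInnerA_step (imgX : List (List Int)) (li c ci maior : Int) (h : ci < c + 1) :
    pvInnerA imgX li c ci maior =
      pvInnerA imgX li c (ci + 1)
        (if maior < pvCell imgX li ci then pvCell imgX li ci else maior) := by
  rw [pvInnerA]; simp [h]

lemma pvOuterA_stop (imgX : List (List Int)) (l c li ci maior : Int) (h : ¬ li < l + 1) :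
    pvOuterA imgX l c li ci maior = maior := by
  rw [pvOuterA]; simp [h]

lemma pvOuterA_step (imgX : List (List Int)) (l c li ci maior : Int) (h : li < l + 1) :
    pvOuterA imgX l c li ci maior =
      pvOuterA imgX l c (li + 1) (pvInnerA imgX li c ci maior).1 (pvInnerA imgX li c ci maior).2 := by
  rw [pvOuterA]; simp [h]

-- ===== VERDICT (by name: the statement is the Claim_ definition above) =====
theorem getMaiorIntensidade_spec : Claim_equal_getMaiorIntensidade := by
  intro l c imgX _ _
  unfold Spec_getMaiorIntensidade getMaiorIntensidade getMaiorIntensidade_alt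
  rw [pvOuterA_step _ _ _ _ _ _ (by omega),
      pvInnerA_step _ _ _ _ _ (by omega),
      pvInnerA_step _ _ _ _ _ (by omega),
      pvInnerA_stop _ _ _ _ _ (by omega)]
  rw [pvOuterA_step _ _ _ _ _ _ (by omega),
      pvInnerA_stop _ _ _ _ _ (by omega)]
  rw [pvOuterA_stop _ _ _ _ _ _ (by omega)]
  have : c - 1 + 1 = c := by omega
  rw [this]
  simp only [max_def]
  split_ifs <;> omega
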